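-- pv_equiv track=rewrite | github.com/WeijieCui/RobotSimulator | src/routing.py | compute_euclidean_distance_matrix
-- ===== SOURCE A (Python) =====
-- import math
--
-- def compute_euclidean_distance_matrix(locations):
--     """Creates callback to return distance between points."""
--     distances = {}
--     length = int(math.sqrt(len(locations)))
--     for from_counter, from_node in enumerate(locations):
--         distances[from_counter] = {}
--         for to_counter, to_node in enumerate(locations):
--             if from_counter == to_counter:
--                 distances[from_counter][to_counter] = 0
--             elif abs(from_counter - to_counter) == length or \
--                     (from_counter - to_counter == 1 and from_counter % length != 0) or \
--                     (from_counter - to_counter == -1 and to_counter % length != 0):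
--                 distances[from_counter][to_counter] = 1
--             else:
--                 # Euclidean distance
--                 distances[from_counter][to_counter] = 10000
--     return distances
-- ===== SOURCE B (Python) =====
-- import math
--
--
-- def compute_euclidean_distance_matrix(locations):
--     """Grid-adjacency matrix: fill each row with 10000 once, then patch only the
--     diagonal and the O(1) explicit neighbours of each node."""
--     n = len(locations)
--     length = int(math.sqrt(n))
--     distances = {}
--     for i in range(n):
--         row = {j: 10000 for j in range(n)}
--         row[i] = 0
--         for j in (i - length, i + length):
--             if 0 <= j < n:
--                 row[j] = 1
--         if i % length != 0:
--             row[i - 1] = 1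
--         if (i + 1) % length != 0 and i + 1 < n:
--             row[i + 1] = 1
--         distances[i] = row
--     return distances
-- ===== Notes on version B (the rewrite author's own statement) =====
-- stated objective: faster
-- what changed: Replaces the O(n^2) classify-every-pair double loop by a per-row default fill (10000) plus O(1) patches: the diagonal cell and the at-most-4 explicit grid neighbours of each node.
import Mathlib
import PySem

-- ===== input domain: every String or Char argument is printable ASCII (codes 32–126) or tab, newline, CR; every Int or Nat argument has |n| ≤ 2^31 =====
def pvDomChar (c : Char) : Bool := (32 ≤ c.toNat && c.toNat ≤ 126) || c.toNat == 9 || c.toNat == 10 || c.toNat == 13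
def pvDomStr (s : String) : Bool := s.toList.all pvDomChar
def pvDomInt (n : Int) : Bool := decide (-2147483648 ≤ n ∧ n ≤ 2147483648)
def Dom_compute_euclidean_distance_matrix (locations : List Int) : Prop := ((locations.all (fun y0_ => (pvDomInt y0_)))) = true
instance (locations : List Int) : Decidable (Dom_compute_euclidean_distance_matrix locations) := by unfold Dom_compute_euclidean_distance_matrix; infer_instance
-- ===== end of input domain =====

-- B fills each row with the default 10000 once and patches only the O(1) adjacency
-- cells per node, instead of classifying every (i, j) pair as A does.

-- ===== PORT A =====
-- int(math.sqrt(k)) = Nat.sqrt k exactly for every feasible list length (doubles are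
-- exact far beyond 2^31 here).
def compute_euclidean_distance_matrix (locations : List Int) : List (Int × List (Int × Int)) :=
  let length : Int := (Nat.sqrt locations.length : Int)
  let distances : PySem.Dict Int (PySem.Dict Int Int) :=
    (PySem.List.enumerate locations).foldl
      (fun d p =>
        let row : PySem.Dict Int Int :=
          (PySem.List.enumerate locations).foldl
            (fun r q =>
              if p.1 = q.1 then r.insert q.1 0
              else if |p.1 - q.1| = length ∨
                      (p.1 - q.1 = 1 ∧ PySem.Int.mod p.1 length ≠ 0) ∨
                      (p.1 - q.1 = -1 ∧ PySem.Int.mod q.1 length ≠ 0) then r.insert q.1 1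
              else r.insert q.1 10000)
            PySem.Dict.empty
        d.insert p.1 row)
      PySem.Dict.empty
  distances.items.map (fun pr => (pr.1, pr.2.items))

-- ===== PORT B =====
-- the outer dict's keys 0,1,…,n-1 are fresh and inserted in order, so building the
-- association list by appending is exact.
def compute_euclidean_distance_matrix_alt (locations : List Int) : List (Int × List (Int × Int)) :=
  let n : Int := locations.length
  let length : Int := (Nat.sqrt locations.length : Int)
  (PySem.List.pyRange 0 n 1).foldl
    (fun acc i =>
      let row0 : PySem.Dict Int Int :=
        (PySem.List.pyRange 0 n 1).foldl (fun r j => r.insert j 10000) PySem.Dict.empty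
      let row1 := row0.insert i 0
      let row2 := [i - length, i + length].foldl
        (fun r j => if 0 ≤ j ∧ j < n then r.insert j 1 else r) row1
      let row3 := if PySem.Int.mod i length ≠ 0 then row2.insert (i - 1) 1 else row2
      let row4 := if PySem.Int.mod (i + 1) length ≠ 0 ∧ i + 1 < n then row3.insert (i + 1) 1 else row3
      acc ++ [(i, row4.items)])
    []

-- ===== PRECONDITION & SPEC =====
def Spec_compute_euclidean_distance_matrix (locations : List Int) (out : List (Int × List (Int × Int))) : Prop := out = compute_euclidean_distance_matrix_alt locations
instance (locations : List Int) (out : List (Int × List (Int × Int))) : Decidable (Spec_compute_euclidean_distance_matrix locations out) := by unfold Spec_compute_euclidean_distance_matrix; infer_instance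

-- ===== CLAIM (what is proved, stated in full; the proofs are below) =====
def Claim_equal_compute_euclidean_distance_matrix : Prop := ∀ (locations : List Int), Dom_compute_euclidean_distance_matrix locations → Spec_compute_euclidean_distance_matrix locations (compute_euclidean_distance_matrix locations)

-- ===== LEMMAS AND PROOFS =====

-- A's cell value at (i, j), with L the grid width.
def pvVal (L i j : Int) : Int :=
  if i = j then 0
  else if |i - j| = L ∨ (i - j = 1 ∧ PySem.Int.mod i L ≠ 0) ∨
          (i - j = -1 ∧ PySem.Int.mod j L ≠ 0) then 1
  else 10000

theorem pv_rowA (locs : List Int) (L i : Int) :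
    ((PySem.List.enumerate locs).foldl
      (fun (r : PySem.Dict Int Int) q =>
        if i = q.1 then r.insert q.1 0
        else if |i - q.1| = L ∨ (i - q.1 = 1 ∧ PySem.Int.mod i L ≠ 0) ∨
                (i - q.1 = -1 ∧ PySem.Int.mod q.1 L ≠ 0) then r.insert q.1 1
        else r.insert q.1 10000)
      PySem.Dict.empty).items
    = (PySem.List.pyRange 0 locs.length 1).map (fun j => (j, pvVal L i j)) := by
  have hfun : (fun (r : PySem.Dict Int Int) (q : Int × Int) =>
      if i = q.1 then r.insert q.1 0
        else if |i - q.1| = L ∨ (i - q.1 = 1 ∧ PySem.Int.mod i L ≠ 0) ∨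
                (i - q.1 = -1 ∧ PySem.Int.mod q.1 L ≠ 0) then r.insert q.1 1
        else r.insert q.1 10000)
      = fun r q => r.insert q.1 (pvVal L i q.1) := by
    funext r q
    simp only [pvVal]
    split_ifs <;> rfl
  rw [hfun]
  rw [PySem.Dict.items_foldl_insert_fresh (PySem.List.enumerate locs) (fun q => q.1)
       (fun q => pvVal L i q.1) PySem.Dict.empty
       (by intro a _; simp [PySem.Dict.contains_empty])
       (by rw [PySem.List.map_fst_enumerate]; exact PySem.List.nodup_pyRange_one 0 (0 + (locs.length : Int)))]
  have hmm : (PySem.List.enumerate locs).map (fun a => (a.1, pvVal L i a.1))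
      = ((PySem.List.enumerate locs).map (·.1)).map (fun j => (j, pvVal L i j)) := by
    rw [List.map_map]; rfl
  rw [hmm, PySem.List.map_fst_enumerate]
  simp [PySem.Dict.empty]

theorem pv_overwrite (n : Int) (g : Int → Int) (d : PySem.Dict Int Int)
    (hd : d.items = (PySem.List.pyRange 0 n 1).map (fun j => (j, g j)))
    (k v : Int) (hk0 : 0 ≤ k) (hkn : k < n) :
    (d.insert k v).items
      = (PySem.List.pyRange 0 n 1).map (fun j => (j, if j = k then v else g j)) := by
  have hc : d.contains k = true := by
    rw [PySem.Dict.contains_eq_decide_mem_keys]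
    simp only [PySem.Dict.keys, hd, List.map_map]
    have hk : k ∈ PySem.List.pyRange 0 n 1 := (PySem.List.mem_pyRange_one).mpr ⟨hk0, hkn⟩
    simp only [Function.comp_def, decide_eq_true_eq]
    exact List.mem_map.mpr ⟨k, hk, rfl⟩
  rw [PySem.Dict.items_insert, if_pos hc, hd, List.map_map]
  apply List.map_congr_left
  intro j _
  by_cases h : j = k
  · subst h; simp
  · simp [h]

theorem pv_overwrite_cond (n : Int) (g : Int → Int) (d : PySem.Dict Int Int)
    (hd : d.items = (PySem.List.pyRange 0 n 1).map (fun j => (j, g j)))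
    (c : Prop) [Decidable c] (k v : Int) (hck : c → 0 ≤ k ∧ k < n) :
    (if c then d.insert k v else d).items
      = (PySem.List.pyRange 0 n 1).map (fun j => (j, if c ∧ j = k then v else g j)) := by
  by_cases hc : c
  · rw [if_pos hc, pv_overwrite n g d hd k v (hck hc).1 (hck hc).2]
    apply List.map_congr_left; intro j _
    simp [hc]
  · rw [if_neg hc, hd]
    apply List.map_congr_left; intro j _
    simp [hc]

theorem pv_val_eq (n L i j : Int) (hL : 1 ≤ L) (hi0 : 0 ≤ i) (hin : i < n)
    (hj0 : 0 ≤ j) (hjn : j < n) :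
    (if (PySem.Int.mod (i + 1) L ≠ 0 ∧ i + 1 < n) ∧ j = i + 1 then (1 : Int)
     else if (PySem.Int.mod i L ≠ 0) ∧ j = i - 1 then 1
     else if (0 ≤ i + L ∧ i + L < n) ∧ j = i + L then 1
     else if (0 ≤ i - L ∧ i - L < n) ∧ j = i - L then 1
     else if j = i then 0
     else 10000) = pvVal L i j := by
  unfold pvVal
  simp only [abs_eq (by omega : (0:Int) ≤ L)]
  by_cases h1 : j = i + 1
  · subst h1
    generalize PySem.Int.mod i L = a
    generalize PySem.Int.mod (i + 1) L = b
    split_ifs <;> omega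
  · generalize PySem.Int.mod i L = a
    generalize PySem.Int.mod (i + 1) L = b
    generalize PySem.Int.mod j L = c
    split_ifs <;> omega

theorem pv_mod_ne_zero_pos (L i : Int) (hL : 1 ≤ L) (hi0 : 0 ≤ i)
    (h : PySem.Int.mod i L ≠ 0) : 1 ≤ i := by
  rcases lt_or_ge i 1 with h1 | h1
  · exfalso
    have hi : i = 0 := by omega
    apply h
    rw [hi, PySem.Int.mod_eq_emod_of_pos (by omega)]
    simp
  · exact h1

-- ===== VERDICT (by name: the statement is the Claim_ definition above) =====
theorem compute_euclidean_distance_matrix_spec : Claim_equal_compute_euclidean_distance_matrix := by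
  intro locations _
  unfold Spec_compute_euclidean_distance_matrix
  unfold compute_euclidean_distance_matrix compute_euclidean_distance_matrix_alt
  dsimp only
  set n : Int := (locations.length : Int) with hn
  set L : Int := (Nat.sqrt locations.length : Int) with hL
  -- A side into canonical form
  rw [PySem.Dict.items_foldl_insert_fresh (PySem.List.enumerate locations) (fun p => p.1)
       (fun p =>
          (PySem.List.enumerate locations).foldl
            (fun (r : PySem.Dict Int Int) q =>
              if p.1 = q.1 then r.insert q.1 0
              else if |p.1 - q.1| = L ∨
                      (p.1 - q.1 = 1 ∧ PySem.Int.mod p.1 L ≠ 0) ∨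
                      (p.1 - q.1 = -1 ∧ PySem.Int.mod q.1 L ≠ 0) then r.insert q.1 1
              else r.insert q.1 10000)
            PySem.Dict.empty)
       PySem.Dict.empty
       (by intro a _; simp [PySem.Dict.contains_empty])
       (by rw [PySem.List.map_fst_enumerate]; exact PySem.List.nodup_pyRange_one 0 (0 + n))]
  rw [PySem.List.foldl_append_singleton_eq_map]
  rw [show (PySem.Dict.empty : PySem.Dict Int (PySem.Dict Int Int)).items = [] from rfl,
     List.nil_append, List.map_map]
  have hA : (PySem.List.enumerate locations).map
      ((fun pr : Int × PySem.Dict Int Int => (pr.1, pr.2.items)) ∘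
        (fun p : Int × Int => (p.1,
          (PySem.List.enumerate locations).foldl
            (fun (r : PySem.Dict Int Int) q =>
              if p.1 = q.1 then r.insert q.1 0
              else if |p.1 - q.1| = L ∨
                      (p.1 - q.1 = 1 ∧ PySem.Int.mod p.1 L ≠ 0) ∨
                      (p.1 - q.1 = -1 ∧ PySem.Int.mod q.1 L ≠ 0) then r.insert q.1 1
              else r.insert q.1 10000)
            PySem.Dict.empty)))
      = ((PySem.List.enumerate locations).map (·.1)).map
          (fun i => (i, (PySem.List.pyRange 0 n 1).map (fun j => (j, pvVal L i j)))) := by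
    rw [List.map_map]
    apply List.map_congr_left
    intro p _
    simp only [Function.comp]
    rw [pv_rowA locations L p.1]
  rw [hA, PySem.List.map_fst_enumerate]
  have h0n : (0 : Int) + n = n := by omega
  rw [h0n]
  -- B side: rewrite each row to the canonical form
  apply List.map_congr_left
  intro i hi
  obtain ⟨hi0, hin⟩ := (PySem.List.mem_pyRange_one).mp hi
  have hn1 : 1 ≤ n := by omega
  have hL1 : (1 : Int) ≤ L := by
    rw [hL]
    have : 0 < Nat.sqrt locations.length := by
      rw [Nat.sqrt_pos]
      omega
    omega
  have h0 : ((PySem.List.pyRange 0 n 1).foldl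
      (fun (r : PySem.Dict Int Int) j => r.insert j 10000) PySem.Dict.empty).items
      = (PySem.List.pyRange 0 n 1).map (fun j => (j, (10000 : Int))) := by
    rw [PySem.Dict.items_foldl_insert_fresh (PySem.List.pyRange 0 n 1) (fun j => j)
         (fun _ => (10000 : Int)) PySem.Dict.empty
         (by intro a _; simp [PySem.Dict.contains_empty])
         (by simpa using PySem.List.nodup_pyRange_one 0 n)]
    simp [PySem.Dict.empty]
  have h1 := pv_overwrite n _ _ h0 i 0 hi0 hin
  simp only [List.foldl_cons, List.foldl_nil]
  have h2a := pv_overwrite_cond n _ _ h1 (0 ≤ i - L ∧ i - L < n) (i - L) 1 (fun h => h)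
  have h2b := pv_overwrite_cond n _ _ h2a (0 ≤ i + L ∧ i + L < n) (i + L) 1 (fun h => h)
  have h3 := pv_overwrite_cond n _ _ h2b (PySem.Int.mod i L ≠ 0) (i - 1) 1
    (fun h => ⟨by have := pv_mod_ne_zero_pos L i hL1 hi0 h; omega, by omega⟩)
  have h4 := pv_overwrite_cond n _ _ h3 (PySem.Int.mod (i + 1) L ≠ 0 ∧ i + 1 < n) (i + 1) 1
    (fun h => ⟨by omega, h.2⟩)
  rw [h4]
  refine congrArg (fun r => (i, r)) ?_
  apply List.map_congr_left
  intro j hj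
  obtain ⟨hj0, hjn⟩ := (PySem.List.mem_pyRange_one).mp hj
  rw [pv_val_eq n L i j hL1 hi0 hin hj0 hjn]
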